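-- pv_equiv track=rewrite | github.com/MichaelBehringer/aoc2024 | d21.py | count_key_sequences
-- ===== SOURCE A (Python) =====
-- def count_key_sequences(sequence):
--     counts = {}
--     current_key = ""
--     for char in sequence:
--         current_key += char
--         if char == "A":
--             counts[current_key] = counts.get(current_key, 0) + 1
--             current_key = ""
--     return counts
-- ===== SOURCE B (Python) =====
-- from collections import Counter
--
--
-- def count_key_sequences(sequence):
--     parts = sequence.split('A')[:-1]
--     return dict(Counter(p + 'A' for p in parts))
-- ===== Notes on version B (the rewrite author's own statement) =====
-- stated objective: faster
-- what changed: Replaces the char-by-char accumulator with manual reset by a tokenize-then-aggregate pipeline: str.split on the letter A yields the chunks in one C-level pass (the trailing remainder is dropped, the separator re-attached) and collections.Counter tallies them.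
import Mathlib
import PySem

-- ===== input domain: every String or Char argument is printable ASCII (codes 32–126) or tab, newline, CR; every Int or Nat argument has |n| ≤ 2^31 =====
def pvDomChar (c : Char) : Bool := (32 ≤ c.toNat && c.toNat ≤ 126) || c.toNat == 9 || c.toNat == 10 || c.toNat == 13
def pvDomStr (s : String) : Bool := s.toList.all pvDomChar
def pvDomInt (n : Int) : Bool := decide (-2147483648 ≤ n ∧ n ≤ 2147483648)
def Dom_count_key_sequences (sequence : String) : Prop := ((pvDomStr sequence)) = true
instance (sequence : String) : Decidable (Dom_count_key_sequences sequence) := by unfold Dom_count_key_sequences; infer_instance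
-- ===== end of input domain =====

-- B replaces A's char-by-char accumulation with manual reset by tokenize (split on 'A', drop the
-- trailing remainder, re-attach the separator) then aggregate (Counter); same return value, measured faster (C-level split/Counter vs a Python char loop).

-- ===== PORT A =====
-- the for-loop over the characters, state = (counts, current_key)
def pvLoopA : List Char → PySem.Dict String Int → String → PySem.Dict String Int
  | [], counts, _ => counts
  | c :: rest, counts, cur =>
    let cur' := cur ++ String.singleton c
    if c = 'A' then
      pvLoopA rest (counts.insert cur' (counts.getD cur' 0 + 1)) ""
    else
      pvLoopA rest counts cur'

def count_key_sequences (sequence : String) : List (String × Int) :=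
  (pvLoopA sequence.toList PySem.Dict.empty "").items

-- ===== PORT B =====
def count_key_sequences_alt (sequence : String) : List (String × Int) :=
  match PySem.Str.split? sequence "A" with
  | none => []  -- unreachable: the separator literal "A" is nonempty, split? never returns none
  | some ps =>
    let parts := PySem.List.slice ps none (some (-1))          -- sequence.split('A')[:-1]
    (PySem.Dict.counter (parts.map (fun p => p ++ "A"))).items -- dict(Counter(p + 'A' for p in parts))

-- ===== PRECONDITION & SPEC =====
def Spec_count_key_sequences (sequence : String) (out : List (String × Int)) : Prop := out = count_key_sequences_alt sequence
instance (sequence : String) (out : List (String × Int)) : Decidable (Spec_count_key_sequences sequence out) := by unfold Spec_count_key_sequences; infer_instance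

-- ===== CLAIM (what is proved, stated in full; the proofs are below) =====
def Claim_equal_count_key_sequences : Prop := ∀ (sequence : String), Dom_count_key_sequences sequence → Spec_count_key_sequences sequence (count_key_sequences sequence)

-- ===== LEMMAS AND PROOFS =====

-- proof-only tokenizer: the maximal chunks ending in 'A' (as Strings), left to right
def pvScanTokens : List Char → String → List String
  | [], _ => []
  | c :: rest, acc =>
    if c = 'A' then (acc ++ String.singleton c) :: pvScanTokens rest ""
    else pvScanTokens rest (acc ++ String.singleton c)

-- proof-only structural split on the single character 'A'
def pvSplitA : List Char → List (List Char)
  | [] => [[]]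
  | c :: rest => if c = 'A' then [] :: pvSplitA rest else (pvSplitA rest).modifyHead (c :: ·)

theorem pvSplitA_ne_nil (l : List Char) : pvSplitA l ≠ [] := by
  cases l with
  | nil => simp [pvSplitA]
  | cons c rest =>
    simp only [pvSplitA]
    split
    · simp
    · cases h : pvSplitA rest with
      | nil => exact absurd h (pvSplitA_ne_nil rest)
      | cons p ps => simp

-- A's loop is exactly "count each scanned token", from any start state
theorem pvLoopA_eq_foldl_tokens (l : List Char) :
    ∀ (acc : String) (d : PySem.Dict String Int),
      pvLoopA l d acc =
        (pvScanTokens l acc).foldl (fun d t => d.insert t (d.getD t 0 + 1)) d := by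
  induction l with
  | nil => intro acc d; rfl
  | cons c rest ih =>
    intro acc d
    by_cases h : c = 'A' <;> simp [pvLoopA, pvScanTokens, h, ih]

-- the fueled splitOn.go on separator ['A'] computes pvSplitA
theorem pvSplitOn_go_eq (fuel : ℕ) :
    ∀ (l cur : List Char) (acc : List (List Char)), l.length ≤ fuel →
      PySem.Chars.splitOn.go ['A'] fuel l cur acc =
        acc.reverse ++ (pvSplitA l).modifyHead (cur.reverse ++ ·) := by
  induction fuel with
  | zero =>
    intro l cur acc hl
    have : l = [] := List.length_eq_zero_iff.mp (Nat.le_zero.mp hl)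
    subst this
    simp [PySem.Chars.splitOn.go, pvSplitA]
  | succ fuel ih =>
    intro l cur acc hl
    cases l with
    | nil => simp [PySem.Chars.splitOn.go, pvSplitA]
    | cons c rest =>
      rw [PySem.Chars.splitOn.go]
      by_cases h : c = 'A'
      · subst h
        have hpre : (['A'] : List Char).isPrefixOf ('A' :: rest) = true := by
          simp [List.isPrefixOf]
        rw [if_pos hpre]
        have hdrop : List.drop (['A'] : List Char).length ('A' :: rest) = rest := rfl
        rw [hdrop, ih rest [] _ (Nat.le_of_succ_le_succ (by simpa using hl))]
        rw [show pvSplitA ('A' :: rest) = [] :: pvSplitA rest from by simp [pvSplitA]]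
        cases hs : pvSplitA rest with
        | nil => exact absurd hs (pvSplitA_ne_nil rest)
        | cons p ps => simp
      · have hpre : (['A'] : List Char).isPrefixOf (c :: rest) = false := by
          simp only [List.isPrefixOf, Bool.and_eq_false_iff, beq_eq_false_iff_ne, ne_eq]
          exact Or.inl fun hh => h hh.symm
        rw [if_neg (by simp [hpre])]
        rw [ih rest (c :: cur) acc (Nat.le_of_succ_le_succ (by simpa using hl))]
        simp only [pvSplitA, if_neg h]
        cases hs : pvSplitA rest with
        | nil => exact absurd hs (pvSplitA_ne_nil rest)
        | cons p ps => simp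

theorem pvSplitOn_singleA (l : List Char) :
    PySem.Chars.splitOn l ['A'] = pvSplitA l := by
  have h := pvSplitOn_go_eq (l.length + 1) l [] [] (Nat.le_succ _)
  rw [PySem.Chars.splitOn, h]
  cases hs : pvSplitA l <;> simp

-- the scanner produces "all parts but the last, with the 'A' re-attached"
theorem pvScanTokens_eq (l : List Char) :
    ∀ (acc : String),
      pvScanTokens l acc =
        (((pvSplitA l).modifyHead (acc.toList ++ ·)).dropLast).map
          (fun p => String.ofList p ++ "A") := by
  induction l with
  | nil =>
    intro acc
    simp [pvScanTokens, pvSplitA]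
  | cons c rest ih =>
    intro acc
    by_cases h : c = 'A'
    · subst h
      cases hs : pvSplitA rest with
      | nil => exact absurd hs (pvSplitA_ne_nil rest)
      | cons p ps =>
        have ih0 := ih ""
        rw [hs] at ih0
        rw [show pvSplitA ('A' :: rest) = [] :: pvSplitA rest from by simp [pvSplitA]]
        simp only [pvScanTokens, hs, ih0]
        simp [String.ofList_toList]
        exact (String.append_left_inj acc).mp rfl
    · cases hs : pvSplitA rest with
      | nil => exact absurd hs (pvSplitA_ne_nil rest)
      | cons p ps =>
        have ih' := ih (acc ++ String.singleton c)
        rw [hs] at ih'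
        simp only [pvScanTokens, if_neg h, pvSplitA, hs, ih']
        simp

-- [:-1] on a nonempty list is dropLast
theorem pvSlice_neg_one {α : Type} (xs : List α) (h : xs ≠ []) :
    PySem.List.slice xs none (some (-1)) = xs.dropLast := by
  have hlen : 1 ≤ xs.length := List.length_pos_of_ne_nil h
  simp only [PySem.List.slice, PySem.List.clampIdx, List.dropLast_eq_take]
  split_ifs <;> simp_all <;> omega

-- ===== VERDICT (by name: the statement is the Claim_ definition above) =====
theorem count_key_sequences_spec : Claim_equal_count_key_sequences := by
  intro s _
  unfold Spec_count_key_sequences count_key_sequences count_key_sequences_alt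
  have hch : PySem.Chars.split? s.toList ("A".toList) = some (pvSplitA s.toList) := by
    simp [PySem.Chars.split?, pvSplitOn_singleA]
  have hsplit : PySem.Str.split? s "A" = some ((pvSplitA s.toList).map String.ofList) := by
    have hm := PySem.Str.split?_map s "A"
    rw [hch] at hm
    cases hx : PySem.Str.split? s "A" with
    | none => rw [hx] at hm; simp at hm
    | some parts =>
      rw [hx] at hm
      simp only [Option.map_some, Option.some.injEq] at hm
      congr 1
      rw [← hm, List.map_map]
      simp [Function.comp_def, String.ofList_toList]
    
  rw [hsplit]
  have hne : (pvSplitA s.toList).map String.ofList ≠ [] := by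
    cases hs : pvSplitA s.toList with
    | nil => exact absurd hs (pvSplitA_ne_nil _)
    | cons p ps => simp
  simp only [pvSlice_neg_one _ hne]
  rw [pvLoopA_eq_foldl_tokens, PySem.Dict.foldl_insert_getD_add_one_eq_counter]
  have htok : pvScanTokens s.toList "" =
      ((pvSplitA s.toList).map String.ofList).dropLast.map (fun p => p ++ "A") := by
    rw [pvScanTokens_eq s.toList ""]
    rw [← List.map_dropLast]
    cases hs : pvSplitA s.toList with
    | nil => exact absurd hs (pvSplitA_ne_nil _)
    | cons p ps =>
      simp [List.map_map, Function.comp_def]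
  rw [htok]
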